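-- pv_equiv track=rewrite | github.com/ToruGuy/experiments | daily-news/search_component.py | cap_newsletters
-- ===== SOURCE A (Python) =====
-- def is_newsletter_like(item):
--     s = (item.get("source") or "") + " " + (item.get("url") or "") + " " + (item.get("title") or "")
--     s = s.lower()
--     return ("newsletter" in s) or ("axios.com/newsletters" in s) or ("substack.com" in s)
--
-- def cap_newsletters(items, cap=1):
--     out = []
--     count = 0
--     for it in items:
--         if is_newsletter_like(it):
--             if count >= cap:
--                 continue
--             count += 1
--         out.append(it)
--     return out
-- ===== SOURCE B (Python) =====
-- def is_newsletter_like(item):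
--     s = (item.get("source") or "") + " " + (item.get("url") or "") + " " + (item.get("title") or "")
--     s = s.lower()
--     return ("newsletter" in s) or ("axios.com/newsletters" in s) or ("substack.com" in s)
--
-- def cap_newsletters(items, cap=1):
--     # No counter, no cap test in any loop: gather every newsletter index,
--     # slice off the excess (everything beyond the first max(cap,0)), filter.
--     nl_indices = [i for i, it in enumerate(items) if is_newsletter_like(it)]
--     drop = set(nl_indices[max(cap, 0):])
--     return [it for i, it in enumerate(items) if i not in drop]
-- ===== Notes on version B (the rewrite author's own statement) =====
-- stated objective: alternative
-- what changed: A decides keep/drop on the fly with a mutable counter compared against cap inside the loop; B has no counter and no per-item cap test at all: it first lists every newsletter index, obtains the drop set by list slicing nl_indices[max(cap,0):], and then filters the enumeration against it.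
import Mathlib
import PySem

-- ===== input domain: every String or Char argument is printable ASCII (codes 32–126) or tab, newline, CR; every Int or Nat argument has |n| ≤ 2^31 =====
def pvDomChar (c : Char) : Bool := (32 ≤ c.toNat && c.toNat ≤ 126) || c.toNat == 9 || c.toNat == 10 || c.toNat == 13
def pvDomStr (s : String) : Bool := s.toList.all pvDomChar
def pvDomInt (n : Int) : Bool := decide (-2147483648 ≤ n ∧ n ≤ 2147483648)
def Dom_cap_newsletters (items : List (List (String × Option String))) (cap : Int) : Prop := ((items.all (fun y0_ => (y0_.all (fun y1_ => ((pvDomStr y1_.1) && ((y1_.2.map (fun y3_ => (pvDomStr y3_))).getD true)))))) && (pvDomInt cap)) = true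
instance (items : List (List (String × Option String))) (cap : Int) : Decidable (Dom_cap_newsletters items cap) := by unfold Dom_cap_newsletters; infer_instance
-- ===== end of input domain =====

-- B replaces A's counter-in-the-loop filtering by: list all newsletter indices, slice off the excess, filter the enumeration. Alternative decomposition, same cost; return value only.

-- ===== PORT A =====
-- shared helper: Python's is_newsletter_like (identical in Source A and Source B)
def pvGetStr (item : List (String × Option String)) (k : String) : List Char :=
  ((((PySem.Dict.mk item).get? k).bind id).getD "").toList

def isNewsletterLike (item : List (String × Option String)) : Bool :=
  let s := PySem.Chars.lower (pvGetStr item "source" ++ [' '] ++ pvGetStr item "url" ++ [' '] ++ pvGetStr item "title")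
  PySem.Chars.isIn "newsletter".toList s || PySem.Chars.isIn "axios.com/newsletters".toList s ||
    PySem.Chars.isIn "substack.com".toList s

def cap_newsletters (items : List (List (String × Option String))) (cap : Int) : List (List (String × Option String)) :=
  (items.foldl (fun (st : List (List (String × Option String)) × Int) it =>
      if isNewsletterLike it then
        if st.2 ≥ cap then st
        else (st.1 ++ [it], st.2 + 1)
      else (st.1 ++ [it], st.2)) ([], 0)).1

-- ===== PORT B =====
def cap_newsletters_alt (items : List (List (String × Option String))) (cap : Int) : List (List (String × Option String)) :=
  -- drop = set(nl_indices[max(cap, 0):]) where nl_indices = [i for i, it in enumerate(items) if is_newsletter_like(it)]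
  -- result = [it for i, it in enumerate(items) if i not in drop]
  ((PySem.List.enumerate items 0).filter (fun p =>
      !(PySem.Set.contains
          (PySem.Set.ofList (PySem.List.slice
            (((PySem.List.enumerate items 0).filter (fun q => isNewsletterLike q.2)).map (·.1))
            (some (max cap 0)) none))
          p.1))).map (·.2)

-- ===== PRECONDITION & SPEC =====
def Spec_cap_newsletters (items : List (List (String × Option String))) (cap : Int) (out : List (List (String × Option String))) : Prop := out = cap_newsletters_alt items cap
instance (items : List (List (String × Option String))) (cap : Int) (out : List (List (String × Option String))) : Decidable (Spec_cap_newsletters items cap out) := by unfold Spec_cap_newsletters; infer_instance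

-- ===== CLAIM (what is proved, stated in full; the proofs are below) =====
def Claim_equal_cap_newsletters : Prop := ∀ (items : List (List (String × Option String))) (cap : Int), Dom_cap_newsletters items cap → Spec_cap_newsletters items cap (cap_newsletters items cap)

-- ===== LEMMAS AND PROOFS =====
-- structural model of A's loop (output list only)
def agoA (cap : Int) : List (List (String × Option String)) → Int → List (List (String × Option String))
  | [], _ => []
  | x :: xs, c =>
    if isNewsletterLike x then
      if c ≥ cap then agoA cap xs c else x :: agoA cap xs (c + 1)
    else x :: agoA cap xs c

-- rank-threshold model of the drop list: newsletter indices whose rank (from r) reaches cap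
def dlistB (cap : Int) : List (List (String × Option String)) → Int → Int → List Int
  | [], _, _ => []
  | x :: xs, i, r =>
    if isNewsletterLike x then
      (if r ≥ cap then [i] else []) ++ dlistB cap xs (i + 1) (r + 1)
    else dlistB cap xs (i + 1) r

-- skip-k model of the drop list: newsletter indices after skipping the first k newsletters
def dlistN : Nat → List (List (String × Option String)) → Int → List Int
  | _, [], _ => []
  | k, x :: xs, i =>
    if isNewsletterLike x then
      match k with
      | 0 => i :: dlistN 0 xs (i + 1)
      | k' + 1 => dlistN k' xs (i + 1)
    else dlistN k xs (i + 1)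

theorem agoA_eq_foldl (cap : Int) : ∀ (l : List (List (String × Option String)))
    (acc : List (List (String × Option String))) (c : Int),
    (l.foldl (fun (st : List (List (String × Option String)) × Int) it =>
      if isNewsletterLike it then
        if st.2 ≥ cap then st
        else (st.1 ++ [it], st.2 + 1)
      else (st.1 ++ [it], st.2)) (acc, c)).1 = acc ++ agoA cap l c := by
  intro l
  induction l with
  | nil => intro acc c; simp [agoA]
  | cons x xs ih =>
    intro acc c
    by_cases hn : isNewsletterLike x <;> by_cases hc : c ≥ cap <;>
      simp [List.foldl_cons, agoA, hn, hc, ih]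

theorem dlistB_ge (cap : Int) : ∀ (l : List (List (String × Option String))) (i r : Int),
    ∀ j ∈ dlistB cap l i r, i ≤ j := by
  intro l
  induction l with
  | nil => intro i r j hj; simp [dlistB] at hj
  | cons x xs ih =>
    intro i r j hj
    by_cases hn : isNewsletterLike x <;> by_cases hr : r ≥ cap <;>
      simp [dlistB, hn, hr] at hj
    · rcases hj with h | h
      · omega
      · have := ih (i + 1) (r + 1) j h; omega
    · have := ih (i + 1) (r + 1) j hj; omega
    · have := ih (i + 1) r j hj; omega
    · have := ih (i + 1) r j hj; omega

-- skipping the first k entries of the newsletter-index list is the skip-k drop list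
theorem nlIdx_drop_eq_dlistN : ∀ (l : List (List (String × Option String))) (i : Int) (k : Nat),
    ((((PySem.List.enumerate l i).filter (fun p => isNewsletterLike p.2)).map (·.1)).drop k)
      = dlistN k l i := by
  intro l
  induction l with
  | nil => intro i k; simp [PySem.List.enumerate_nil, dlistN]
  | cons x xs ih =>
    intro i k
    rw [PySem.List.enumerate_cons]
    by_cases hn : isNewsletterLike x
    · cases k with
      | zero => simp [dlistN, hn, ← ih (i + 1) 0]
      | succ k' => simp [dlistN, hn, ih]
    · simp [dlistN, hn, ih]

-- the skip-k drop list is the rank-threshold drop list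
theorem dlistN_eq_dlistB (cap : Int) : ∀ (l : List (List (String × Option String))) (i r : Int),
    dlistN (cap - r).toNat l i = dlistB cap l i r := by
  intro l
  induction l with
  | nil => intro i r; simp [dlistN, dlistB]
  | cons x xs ih =>
    intro i r
    by_cases hn : isNewsletterLike x
    · by_cases hr : r ≥ cap
      · have hk : (cap - r).toNat = 0 := by omega
        have hk1 : (cap - (r + 1)).toNat = 0 := by omega
        rw [hk]
        show (if isNewsletterLike x then i :: dlistN 0 xs (i + 1) else dlistN 0 xs (i + 1)) = _
        rw [if_pos hn, ← hk1, ih (i + 1) (r + 1)]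
        simp [dlistB, hn, hr]
      · have hk : (cap - r).toNat = (cap - (r + 1)).toNat + 1 := by omega
        simp [dlistN, dlistB, hn, hr, hk, ih]
    · simp [dlistN, dlistB, hn, ih]

-- filtering the tail enumeration ignores drop indices ≤ i
theorem filter_tail_congr (xs : List (List (String × Option String))) (i : Int)
    (D D' : List Int) (h : ∀ p ∈ PySem.List.enumerate xs (i + 1), D.contains p.1 = D'.contains p.1) :
    ((PySem.List.enumerate xs (i + 1)).filter (fun p => !(PySem.Set.contains D p.1))).map (·.2)
      = ((PySem.List.enumerate xs (i + 1)).filter (fun p => !(PySem.Set.contains D' p.1))).map (·.2) := by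
  congr 1
  apply List.filter_congr
  intro p hp
  simp only [PySem.Set.contains_eq_listContains]
  rw [h p hp]

-- core: filtering the enumeration against the drop list equals A's streaming loop,
-- for any pair of ranks that are either equal or both saturated
theorem filter_dlist_eq_agoA (cap : Int) : ∀ (l : List (List (String × Option String)))
    (i rA rB : Int), (rA = rB ∨ (cap ≤ rA ∧ cap ≤ rB)) →
    ((PySem.List.enumerate l i).filter (fun p => !(PySem.Set.contains (dlistB cap l i rB) p.1))).map (·.2)
      = agoA cap l rA := by
  intro l
  induction l with
  | nil => intro i rA rB _; simp [PySem.List.enumerate_nil, agoA]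
  | cons x xs ih =>
    intro i rA rB hR
    have hsat : (rA ≥ cap) = (rB ≥ cap) := by
      rcases hR with h | h
      · rw [h]
      · simp only [ge_iff_le, eq_iff_iff]
        exact ⟨fun _ => h.2, fun _ => h.1⟩
    rw [PySem.List.enumerate_cons]
    by_cases hn : isNewsletterLike x <;> by_cases hr : rB ≥ cap
    · -- newsletter, saturated: head dropped
      have hdl : dlistB cap (x :: xs) i rB = i :: dlistB cap xs (i + 1) (rB + 1) := by
        simp [dlistB, hn, hr]
      rw [hdl, List.filter_cons]
      have hhead : (!(PySem.Set.contains (i :: dlistB cap xs (i + 1) (rB + 1)) ((i, x) : Int × List (String × Option String)).1)) = false := by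
        simp [PySem.Set.contains_eq_listContains, List.contains_eq_mem]
      rw [hhead, if_neg (by simp)]
      rw [filter_tail_congr xs i (i :: dlistB cap xs (i + 1) (rB + 1)) (dlistB cap xs (i + 1) (rB + 1)) (by
        intro p hp
        rcases (PySem.List.mem_enumerate_iff xs (i + 1) p).1 hp with ⟨k, hk, hpk⟩
        have hp1 : p.1 = i + 1 + k := by rw [hpk]
        simp [List.contains_eq_mem, hp1]
        omega)]
      have hrA : rA ≥ cap := by rw [hsat]; exact hr
      rw [ih (i + 1) rA (rB + 1) (Or.inr ⟨hrA, by omega⟩)]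
      simp [agoA, hn, hrA]
    · -- newsletter, below cap: head kept, both ranks advance together
      have hrA : ¬ rA ≥ cap := by rw [hsat]; exact hr
      have hAB : rA = rB := by
        rcases hR with h | h
        · exact h
        · exact absurd h.2 hr
      have hdl : dlistB cap (x :: xs) i rB = dlistB cap xs (i + 1) (rB + 1) := by
        simp [dlistB, hn, hr]
      rw [hdl, List.filter_cons]
      have hhead : (!(PySem.Set.contains (dlistB cap xs (i + 1) (rB + 1)) ((i, x) : Int × List (String × Option String)).1)) = true := by
        simp [PySem.Set.contains_eq_listContains, List.contains_eq_mem]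
        intro h
        have := dlistB_ge cap xs (i + 1) (rB + 1) i h
        omega
      rw [hhead, if_pos rfl, List.map_cons]
      rw [ih (i + 1) (rA + 1) (rB + 1) (Or.inl (by omega))]
      simp [agoA, hn, hrA]
    all_goals (
      -- not newsletter: head kept, drop list and ranks unchanged
      have hdl : dlistB cap (x :: xs) i rB = dlistB cap xs (i + 1) rB := by
        simp [dlistB, hn]
      rw [hdl, List.filter_cons]
      have hhead : (!(PySem.Set.contains (dlistB cap xs (i + 1) rB) ((i, x) : Int × List (String × Option String)).1)) = true := by
        simp [PySem.Set.contains_eq_listContains, List.contains_eq_mem]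
        intro h
        have := dlistB_ge cap xs (i + 1) rB i h
        omega
      rw [hhead, if_pos rfl, List.map_cons]
      rw [ih (i + 1) rA rB hR]
      simp [agoA, hn])

-- filtering against set(D) is filtering against D (same membership)
theorem filter_ofList_congr (l : List (List (String × Option String))) (i : Int) (D : List Int) :
    ((PySem.List.enumerate l i).filter (fun p => !(PySem.Set.contains (PySem.Set.ofList D) p.1))).map (·.2)
      = ((PySem.List.enumerate l i).filter (fun p => !(PySem.Set.contains D p.1))).map (·.2) := by
  congr 1
  apply List.filter_congr
  intro p _
  simp [PySem.Set.contains_eq_listContains, List.contains_eq_mem, PySem.Set.mem_ofList]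

-- ===== VERDICT (by name: the statement is the Claim_ definition above) =====
theorem cap_newsletters_spec : Claim_equal_cap_newsletters := by
  intro items cap _
  unfold Spec_cap_newsletters cap_newsletters cap_newsletters_alt
  rw [agoA_eq_foldl cap items [] 0, List.nil_append]
  rw [PySem.List.slice_from _ (le_max_right cap 0)]
  have hk : (max cap 0).toNat = (cap - 0).toNat := by omega
  rw [hk, nlIdx_drop_eq_dlistN items 0 (cap - 0).toNat, dlistN_eq_dlistB cap items 0 0]
  rw [filter_ofList_congr items 0 (dlistB cap items 0 0)]
  rw [filter_dlist_eq_agoA cap items 0 0 0 (Or.inl rfl)]
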